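-- pv_equiv track=rewrite | github.com/eduintbd/Ekush_CRM | prisma/seed/parse-pdf.py | parse_fund_prefix
-- ===== SOURCE A (Python) =====
-- FUND_MAP = {
--     "ekush first unit fund": "EFUF",
--     "ekush growth fund": "EGF",
--     "ekush stable return fund": "ESRF",
-- }
--
-- def parse_fund_prefix(words):
--     """Return (fund_code, remaining_words) or (None, words).
--     Fund name spans first several words. Try longest match first.
--     """
--     text = " ".join(w["text"] for w in words).lower()
--     for name, code in FUND_MAP.items():
--         if text.startswith(name):
--             # Figure out how many words to consume
--             name_words = name.split()
--             if len(words) >= len(name_words):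
--                 joined = " ".join(w["text"].lower() for w in words[: len(name_words)])
--                 if joined == name:
--                     return code, words[len(name_words):]
--     return None, words
-- ===== SOURCE B (Python) =====
-- def parse_fund_prefix(words):
--     """Return (fund_code, remaining_words) or (None, words).
--     Fixed decision chain over the lowered leading words: no fund-map loop,
--     no joined text, no startswith/split."""
--     low = [w["text"].lower() for w in words[:4]]
--     if low == ["ekush", "first", "unit", "fund"]:
--         return "EFUF", words[4:]
--     if low[:3] == ["ekush", "growth", "fund"]:
--         return "EGF", words[3:]
--     if low == ["ekush", "stable", "return", "fund"]:
--         return "ESRF", words[4:]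
--     return None, words
-- ===== Notes on version B (the rewrite author's own statement) =====
-- stated objective: simpler
-- what changed: B removes the FUND_MAP loop, the joined-and-lowered full text, startswith and split entirely: it lowers only the first four word texts and decides by a fixed chain of list comparisons against the unrolled fund-name word sequences.
import Mathlib
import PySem

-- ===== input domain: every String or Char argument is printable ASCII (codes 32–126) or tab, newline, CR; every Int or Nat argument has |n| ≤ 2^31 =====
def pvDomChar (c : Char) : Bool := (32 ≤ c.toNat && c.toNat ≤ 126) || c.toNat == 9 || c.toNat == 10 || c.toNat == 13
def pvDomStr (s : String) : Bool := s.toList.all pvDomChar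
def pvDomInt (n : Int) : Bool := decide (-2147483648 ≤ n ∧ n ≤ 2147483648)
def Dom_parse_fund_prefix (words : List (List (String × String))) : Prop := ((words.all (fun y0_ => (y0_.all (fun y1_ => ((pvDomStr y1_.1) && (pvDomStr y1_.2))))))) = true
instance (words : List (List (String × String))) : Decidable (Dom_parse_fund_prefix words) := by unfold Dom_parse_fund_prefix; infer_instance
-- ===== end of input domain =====

-- B removes the FUND_MAP loop, the joined text, startswith and split: it lowers only the first
-- four word texts and decides by a fixed chain of list comparisons (objective: simpler).

-- shared helper: w["text"] (first match; Pre_ guarantees the key is present)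
def pvGetText (w : List (String × String)) : String :=
  PySem.Dict.getD (PySem.Dict.mk w) "text" ""

-- ===== PORT A =====
def pvFUND_MAP : List (String × String) :=
  [("ekush first unit fund", "EFUF"),
   ("ekush growth fund", "EGF"),
   ("ekush stable return fund", "ESRF")]

def pvLoopA (text : String) (words : List (List (String × String))) :
    List (String × String) → Option String × (List (List (String × String)))
  | [] => (none, words)
  | (name, code) :: rest =>
    if PySem.Str.startswith text name then
      let nameWords := PySem.Str.split₀ name
      if nameWords.length ≤ words.length then
        let joined := PySem.Str.join " "
          ((PySem.List.slice words none (some (nameWords.length : Int))).map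
            (fun w => PySem.Str.lower (pvGetText w)))
        if joined = name then
          (some code, PySem.List.slice words (some (nameWords.length : Int)) none)
        else pvLoopA text words rest
      else pvLoopA text words rest
    else pvLoopA text words rest

def parse_fund_prefix (words : List (List (String × String))) : Option String × (List (List (String × String))) :=
  let text := PySem.Str.lower (PySem.Str.join " " (words.map pvGetText))
  pvLoopA text words pvFUND_MAP

-- ===== PORT B =====
def parse_fund_prefix_alt (words : List (List (String × String))) : Option String × (List (List (String × String))) :=
  let low := (PySem.List.slice words none (some (4 : Int))).map
    (fun w => PySem.Str.lower (pvGetText w))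
  if low = ["ekush", "first", "unit", "fund"] then
    (some "EFUF", PySem.List.slice words (some (4 : Int)) none)
  else if PySem.List.slice low none (some (3 : Int)) = ["ekush", "growth", "fund"] then
    (some "EGF", PySem.List.slice words (some (3 : Int)) none)
  else if low = ["ekush", "stable", "return", "fund"] then
    (some "ESRF", PySem.List.slice words (some (4 : Int)) none)
  else (none, words)

-- ===== PRECONDITION & SPEC =====
-- Pre_ excludes exactly the inputs on which Python A raises KeyError: a word dict without a "text" key.
def Pre_parse_fund_prefix (words : List (List (String × String))) : Prop :=
  (words.all fun w => (PySem.Dict.mk w).contains "text") = true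
instance (words : List (List (String × String))) : Decidable (Pre_parse_fund_prefix words) := by unfold Pre_parse_fund_prefix; infer_instance

def pvWitness_parse_fund_prefix : (List (List (String × String))) :=
  [[("text", "Ekush")], [("text", "Growth")], [("text", "Fund")], [("text", "NAV"), ("size", "12")]]

def Spec_parse_fund_prefix (words : List (List (String × String))) (out : Option String × (List (List (String × String)))) : Prop := out = parse_fund_prefix_alt words
instance (words : List (List (String × String))) (out : Option String × (List (List (String × String)))) : Decidable (Spec_parse_fund_prefix words out) := by unfold Spec_parse_fund_prefix; infer_instance

-- ===== CLAIM (what is proved, stated in full; the proofs are below) =====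
def Claim_equal_parse_fund_prefix : Prop := ∀ (words : List (List (String × String))), Dom_parse_fund_prefix words → Pre_parse_fund_prefix words → Spec_parse_fund_prefix words (parse_fund_prefix words)

-- ===== LEMMAS AND PROOFS =====

-- proof-side normal form of A's loop: a chain of (length, word-prefix) tests
def pvChain (words : List (List (String × String))) (texts : List String) :
    List (String × String) → Option String × (List (List (String × String)))
  | [] => (none, words)
  | (name, code) :: rest =>
    let nameWords := PySem.Str.split₀ name
    if nameWords.length ≤ texts.length ∧ texts.take nameWords.length = nameWords then
      (some code, words.drop nameWords.length)
    else pvChain words texts rest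

-- a fund name is "good": nonempty word list, its words contain no space,
-- and space-joining its words gives the name back
def pvGoodName (name : String) : Prop :=
  PySem.Str.split₀ name ≠ [] ∧
  (∀ t ∈ PySem.Str.split₀ name, ' ' ∉ t.toList) ∧
  PySem.Chars.join [' '] ((PySem.Str.split₀ name).map String.toList) = name.toList

theorem pv_count_join (a : List Char) :
    ∀ (as : List (List Char)),
      (PySem.Chars.join [' '] (a :: as)).count ' ' =
        a.count ' ' + (((as.map (List.count ' ')).sum) + as.length) := by
  intro as
  induction as generalizing a with
  | nil => simp [PySem.Chars.join_singleton]
  | cons a' as' ih =>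
    rw [PySem.Chars.join_cons_cons]
    have h1 : List.count ' ' [' '] = 1 := by decide
    simp only [List.count_append, ih a', List.map_cons, List.sum_cons, List.length_cons, h1]
    omega

theorem pv_append_space_inj :
    ∀ (a b ra rb : List Char), ' ' ∉ a → ' ' ∉ b →
      a ++ ' ' :: ra = b ++ ' ' :: rb → a = b ∧ ra = rb := by
  intro a
  induction a with
  | nil =>
    intro b ra rb _ hb h
    cases b with
    | nil => simpa using h
    | cons c b' =>
      simp only [List.nil_append, List.cons_append, List.cons.injEq] at h
      exact absurd (h.1 ▸ List.mem_cons_self) hb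
  | cons c a' ih =>
    intro b ra rb ha hb h
    cases b with
    | nil =>
      simp only [List.cons_append, List.nil_append, List.cons.injEq] at h
      exact absurd (h.1 ▸ List.mem_cons_self) ha
    | cons d b' =>
      simp only [List.cons_append, List.cons.injEq] at h
      have := ih b' ra rb (fun hm => ha (List.mem_cons_of_mem _ hm))
        (fun hm => hb (List.mem_cons_of_mem _ hm)) h.2
      exact ⟨by rw [h.1, this.1], this.2⟩

theorem pv_join_inj_spacefree :
    ∀ (as bs : List (List Char)), as.length = bs.length →
      (∀ a ∈ as, ' ' ∉ a) → (∀ b ∈ bs, ' ' ∉ b) →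
      PySem.Chars.join [' '] as = PySem.Chars.join [' '] bs → as = bs := by
  intro as
  induction as with
  | nil =>
    intro bs hlen _ _ _
    cases bs with
    | nil => rfl
    | cons b bs' => simp at hlen
  | cons a as' ih =>
    intro bs hlen ha hb hj
    cases bs with
    | nil => simp at hlen
    | cons b bs' =>
      cases as' with
      | nil =>
        cases bs' with
        | nil =>
          rw [PySem.Chars.join_singleton, PySem.Chars.join_singleton] at hj
          rw [hj]
        | cons b' bs'' => simp at hlen
      | cons a' as'' =>
        cases bs' with
        | nil => simp at hlen
        | cons b' bs'' =>
          rw [PySem.Chars.join_cons_cons, PySem.Chars.join_cons_cons] at hj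
          simp only [List.append_assoc, List.singleton_append] at hj
          have h2 := pv_append_space_inj a b _ _
            (ha a List.mem_cons_self) (hb b List.mem_cons_self) hj
          have h3 := ih (b' :: bs'') (by simpa using hlen)
            (fun x hx => ha x (List.mem_cons_of_mem _ hx))
            (fun x hx => hb x (List.mem_cons_of_mem _ hx)) h2.2
          rw [h2.1, h3]

-- join equality with space-free right-hand side forces the left side space-free too
theorem pv_join_eq_spacefree :
    ∀ (as bs : List (List Char)), as.length = bs.length →
      (∀ b ∈ bs, ' ' ∉ b) →
      PySem.Chars.join [' '] as = PySem.Chars.join [' '] bs → as = bs := by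
  intro as bs hlen hb hj
  cases as with
  | nil =>
    cases bs with
    | nil => rfl
    | cons b bs' => simp at hlen
  | cons a as' =>
    cases bs with
    | nil => simp at hlen
    | cons b bs' =>
      have hc : (PySem.Chars.join [' '] (a :: as')).count ' ' =
          (PySem.Chars.join [' '] (b :: bs')).count ' ' := by rw [hj]
      rw [pv_count_join, pv_count_join] at hc
      have hb0 : b.count ' ' = 0 :=
        List.count_eq_zero.mpr (hb b List.mem_cons_self)
      have hbs : (bs'.map (List.count ' ')).sum = 0 := by
        apply List.sum_eq_zero
        intro x hx
        rcases List.mem_map.mp hx with ⟨t, ht, rfl⟩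
        exact List.count_eq_zero.mpr (hb t (List.mem_cons_of_mem _ ht))
      have hlen' : as'.length = bs'.length := by simpa using hlen
      have hsum : a.count ' ' + (as'.map (List.count ' ')).sum = 0 := by omega
      have ha : ∀ x ∈ a :: as', ' ' ∉ x := by
        intro x hx
        rcases List.mem_cons.mp hx with rfl | hx'
        · exact List.count_eq_zero.mp (by omega)
        · have : (x.count ' ') = 0 := by
            have hmem : x.count ' ' ∈ as'.map (List.count ' ') :=
              List.mem_map.mpr ⟨x, hx', rfl⟩
            have := List.le_sum_of_mem hmem
            omega
          exact List.count_eq_zero.mp this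
      exact pv_join_inj_spacefree _ _ hlen ha hb hj

-- a nonempty prefix of the parts gives a prefix of the join
theorem pv_join_prefix (as : List (List Char)) :
    ∀ (bs : List (List Char)), as ≠ [] →
      PySem.Chars.join [' '] as <+: PySem.Chars.join [' '] (as ++ bs) := by
  induction as with
  | nil => intro bs h; exact absurd rfl h
  | cons a as' ih =>
    intro bs _
    cases as' with
    | nil =>
      cases bs with
      | nil => simp
      | cons b bs' =>
        rw [PySem.Chars.join_singleton]
        simp only [List.singleton_append]
        rw [PySem.Chars.join_cons_cons]
        exact ⟨[' '] ++ PySem.Chars.join [' '] (b :: bs'), by simp⟩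
    | cons a' as'' =>
      rw [PySem.Chars.join_cons_cons]
      simp only [List.cons_append]
      rw [PySem.Chars.join_cons_cons]
      simp only [List.append_assoc]
      exact (List.prefix_append_right_inj _).mpr
        ((List.prefix_append_right_inj _).mpr (ih bs (by simp)))

-- lowercasing commutes with space-joining
theorem pv_lower_join (ls : List (List Char)) :
    PySem.Chars.lower (PySem.Chars.join [' '] ls) =
      PySem.Chars.join [' '] (ls.map PySem.Chars.lower) := by
  induction ls with
  | nil => simp [PySem.Chars.join_nil, PySem.Chars.lower]
  | cons a ls' ih =>
    cases ls' with
    | nil => simp [PySem.Chars.join_singleton]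
    | cons a' ls'' =>
      rw [PySem.Chars.join_cons_cons, List.map_cons, List.map_cons,
        PySem.Chars.join_cons_cons, ← List.map_cons, ← ih]
      simp only [PySem.Chars.lower, List.map_append]
      rw [show List.map PySem.Chars.lowerChar [' '] = [' '] from by decide]

-- the per-word lowered texts, as char lists
def pvLows (words : List (List (String × String))) : List (List Char) :=
  words.map fun w => (PySem.Str.lower (pvGetText w)).toList

theorem pv_text_toList (words : List (List (String × String))) :
    (PySem.Str.lower (PySem.Str.join " " (words.map pvGetText))).toList =
      PySem.Chars.join [' '] (pvLows words) := by
  rw [PySem.Str.toList_lower, PySem.Str.toList_join]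
  have : (" " : String).toList = [' '] := rfl
  rw [this, pv_lower_join, pvLows]
  congr 1
  simp only [List.map_map]
  apply List.map_congr_left
  intro w _
  simp [Function.comp, PySem.Str.toList_lower]

theorem pv_take_lows (words : List (List (String × String))) (k : Nat) :
    (pvLows words).take k =
      ((words.take k).map fun w => PySem.Str.lower (pvGetText w)).map String.toList := by
  rw [pvLows, ← List.map_take, List.map_map]
  rfl

theorem pv_joined_toList (words : List (List (String × String))) (k : Nat) :
    (PySem.Str.join " " ((words.take k).map fun w => PySem.Str.lower (pvGetText w))).toList =
      PySem.Chars.join [' '] ((pvLows words).take k) := by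
  rw [PySem.Str.toList_join, pv_take_lows]
  rfl

-- the heart: A's three-test condition coincides with the chain's prefix condition
theorem pv_cond_iff (words : List (List (String × String))) (name : String)
    (hg : pvGoodName name) :
    (PySem.Str.startswith
        (PySem.Str.lower (PySem.Str.join " " (words.map pvGetText))) name = true ∧
      (PySem.Str.split₀ name).length ≤ words.length ∧
      PySem.Str.join " " ((words.take (PySem.Str.split₀ name).length).map
        fun w => PySem.Str.lower (pvGetText w)) = name) ↔
    ((PySem.Str.split₀ name).length ≤ words.length ∧
      (words.map fun w => PySem.Str.lower (pvGetText w)).take (PySem.Str.split₀ name).length =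
        PySem.Str.split₀ name) := by
  obtain ⟨hne, hsf, hjoin⟩ := hg
  set nw := PySem.Str.split₀ name with hnw
  have hlows : ∀ (_ : nw.length ≤ words.length),
      ((words.map fun w => PySem.Str.lower (pvGetText w)).take nw.length = nw ↔
        ((pvLows words).take nw.length = nw.map String.toList)) := by
    intro _
    rw [← List.map_take, pv_take_lows]
    constructor
    · intro he; rw [he]
    · intro he; exact List.map_injective_iff.mpr (fun a b hab => String.toList_inj.mp hab) he
  constructor
  · rintro ⟨_, hlen, hjeq⟩
    refine ⟨hlen, ?_⟩
    rw [hlows hlen]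
    have hjl : PySem.Chars.join [' '] ((pvLows words).take nw.length) =
        PySem.Chars.join [' '] (nw.map String.toList) := by
      rw [← pv_joined_toList, hjeq, hjoin]
    refine pv_join_eq_spacefree _ _ ?_ ?_ hjl
    · rw [List.length_take, List.length_map, pvLows, List.length_map]
      omega
    · intro b hb
      rcases List.mem_map.mp hb with ⟨t, ht, rfl⟩
      exact hsf t ht
  · rintro ⟨hlen, hall⟩
    have htake : (pvLows words).take nw.length = nw.map String.toList := (hlows hlen).mp hall
    have hjeq : PySem.Str.join " " ((words.take nw.length).map
        fun w => PySem.Str.lower (pvGetText w)) = name := by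
      apply String.toList_inj.mp
      rw [pv_joined_toList, htake, hjoin]
    refine ⟨?_, hlen, hjeq⟩
    · rw [PySem.Str.startswith_eq, PySem.Chars.startswith_iff, pv_text_toList]
      have hsplit : pvLows words =
          (pvLows words).take nw.length ++ (pvLows words).drop nw.length :=
        (List.take_append_drop _ _).symm
      rw [hsplit, htake, ← hjoin]
      apply pv_join_prefix
      intro h
      exact hne (by simpa using congrArg List.length h)

-- A's loop equals the normal-form chain
theorem pv_loopA_eq_chain (words : List (List (String × String))) :
    ∀ (items : List (String × String)), (∀ p ∈ items, pvGoodName p.1) →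
      pvLoopA (PySem.Str.lower (PySem.Str.join " " (words.map pvGetText))) words items =
        pvChain words (words.map fun w => PySem.Str.lower (pvGetText w)) items := by
  intro items
  induction items with
  | nil => intro _; rfl
  | cons p rest ih =>
    intro hg
    obtain ⟨name, code⟩ := p
    have hgn : pvGoodName name := hg (name, code) List.mem_cons_self
    have hrest := ih (fun q hq => hg q (List.mem_cons_of_mem _ hq))
    have hiff := pv_cond_iff words name hgn
    rw [pvLoopA, pvChain]
    simp only
    rw [PySem.List.slice_to_natCast, PySem.List.slice_from_natCast]
    simp only [List.length_map]
    by_cases hB : ((PySem.Str.split₀ name).length ≤ words.length ∧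
        (words.map fun w => PySem.Str.lower (pvGetText w)).take
          (PySem.Str.split₀ name).length = PySem.Str.split₀ name) <;>
      [skip; rw [if_neg hB]]
    · obtain ⟨hs, hlen, hj⟩ := hiff.mpr hB
      rw [if_pos hs, if_pos hlen, if_pos hj, if_pos hB]
    · by_cases hs : PySem.Str.startswith
          (PySem.Str.lower (PySem.Str.join " " (words.map pvGetText))) name = true
      · rw [if_pos hs]
        by_cases hlen : (PySem.Str.split₀ name).length ≤ words.length
        · rw [if_pos hlen]
          by_cases hj : PySem.Str.join " " ((words.take (PySem.Str.split₀ name).length).map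
              fun w => PySem.Str.lower (pvGetText w)) = name
          · exact absurd (hiff.mp ⟨hs, hlen, hj⟩) hB
          · rw [if_neg hj]; exact hrest
        · rw [if_neg hlen]; exact hrest
      · rw [if_neg hs]; exact hrest

-- a take-k test against a length-k list already forces k ≤ length
theorem pv_take_eq_iff {α : Type} (xs l : List α) (k : Nat) (hl : l.length = k) :
    xs.take k = l ↔ (k ≤ xs.length ∧ xs.take k = l) := by
  constructor
  · intro h
    refine ⟨?_, h⟩
    have := congrArg List.length h
    simp [hl] at this
    omega
  · exact And.right

-- the chain over the concrete fund map equals B's fixed decision chain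
theorem pv_chain_eq_alt (words : List (List (String × String))) :
    pvChain words (words.map fun w => PySem.Str.lower (pvGetText w)) pvFUND_MAP =
      parse_fund_prefix_alt words := by
  set texts := words.map fun w => PySem.Str.lower (pvGetText w) with htexts
  have hlen : texts.length = words.length := by rw [htexts, List.length_map]
  simp only [parse_fund_prefix_alt]
  rw [show ((4 : Int)) = ((4 : Nat) : Int) from rfl,
      show ((3 : Int)) = ((3 : Nat) : Int) from rfl]
  rw [PySem.List.slice_to_natCast, PySem.List.slice_from_natCast, PySem.List.slice_from_natCast]
  have hlow : (words.take 4).map (fun w => PySem.Str.lower (pvGetText w)) = texts.take 4 := by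
    rw [htexts, List.map_take]
  rw [hlow]
  rw [PySem.List.slice_to_natCast, List.take_take]
  simp only [pvFUND_MAP, pvChain]
  have h1 : PySem.Str.split₀ "ekush first unit fund" = ["ekush", "first", "unit", "fund"] := by decide
  have h2 : PySem.Str.split₀ "ekush growth fund" = ["ekush", "growth", "fund"] := by decide
  have h3 : PySem.Str.split₀ "ekush stable return fund" = ["ekush", "stable", "return", "fund"] := by decide
  rw [h1, h2, h3]
  simp only [List.length_cons, List.length_nil]
  norm_num
  by_cases c1 : texts.take 4 = ["ekush", "first", "unit", "fund"]
  · have h4 : 4 ≤ texts.length := ((pv_take_eq_iff texts _ 4 rfl).mp c1).1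
    rw [if_pos (⟨h4, c1⟩ : _ ∧ _), if_pos c1]
  · rw [if_neg (fun h => c1 h.2), if_neg c1]
    by_cases c2 : texts.take 3 = ["ekush", "growth", "fund"]
    · have h3' : 3 ≤ texts.length := ((pv_take_eq_iff texts _ 3 rfl).mp c2).1
      rw [if_pos (⟨h3', c2⟩ : _ ∧ _), if_pos c2]
    · rw [if_neg (fun h => c2 h.2), if_neg c2]
      by_cases c3 : texts.take 4 = ["ekush", "stable", "return", "fund"]
      · have h4' : 4 ≤ texts.length := ((pv_take_eq_iff texts _ 4 rfl).mp c3).1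
        rw [if_pos (⟨h4', c3⟩ : _ ∧ _), if_pos c3]
      · rw [if_neg (fun h => c3 h.2), if_neg c3]

-- ===== VERDICT (by name: the statement is the Claim_ definition above) =====
theorem parse_fund_prefix_spec : Claim_equal_parse_fund_prefix := by
  intro words _ _
  unfold Spec_parse_fund_prefix parse_fund_prefix
  rw [pv_loopA_eq_chain words pvFUND_MAP, pv_chain_eq_alt]
  intro p hp
  simp only [pvFUND_MAP, List.mem_cons, List.not_mem_nil, or_false] at hp
  rcases hp with h | h | h <;>
    (subst h; exact ⟨by decide, by decide, by decide⟩)
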